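-- pv_equiv track=rewrite | github.com/atanu0909/raghindi | app.py | parse_generated_questions
-- ===== SOURCE A (Python) =====
-- def parse_generated_questions(questions_text):
--     """Parse generated questions into list"""
--     questions = []
--     current_question = ""
--
--     lines = questions_text.split('\n')
--     for line in lines:
--         line = line.strip()
--         if line and (line[0].isdigit() or line.startswith('Q')):
--             if current_question:
--                 questions.append(current_question.strip())
--             current_question = line
--         else:
--             current_question += f"\n{line}"
--
--     if current_question:
--         questions.append(current_question.strip())
--
--     return questions
-- ===== SOURCE B (Python) =====
-- def _is_header(line):
--     return bool(line) and (line[0].isdigit() or line.startswith('Q'))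
--
--
-- def _split_lead(ls):
--     """Split ls into (longest non-header prefix, rest starting at first header)."""
--     if not ls or _is_header(ls[0]):
--         return [], ls
--     lead, rest = _split_lead(ls[1:])
--     return [ls[0]] + lead, rest
--
--
-- def _groups(rest):
--     """rest starts with a header (or is empty): one question per header."""
--     if not rest:
--         return []
--     body, rest2 = _split_lead(rest[1:])
--     return ['\n'.join([rest[0]] + body).strip()] + _groups(rest2)
--
--
-- def parse_generated_questions(questions_text):
--     lines = [ln.strip() for ln in questions_text.split('\n')]
--     lead, rest = _split_lead(lines)
--     head = ['\n'.join(lead).strip()] if lead else []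
--     return head + _groups(rest)
-- ===== Notes on version B (the rewrite author's own statement) =====
-- stated objective: alternative
-- what changed: Replaces A's single stateful scan with a string accumulator by a segmentation: find header boundaries, partition the stripped lines into a leading segment plus one segment per header, and join/strip each segment.
import Mathlib
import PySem

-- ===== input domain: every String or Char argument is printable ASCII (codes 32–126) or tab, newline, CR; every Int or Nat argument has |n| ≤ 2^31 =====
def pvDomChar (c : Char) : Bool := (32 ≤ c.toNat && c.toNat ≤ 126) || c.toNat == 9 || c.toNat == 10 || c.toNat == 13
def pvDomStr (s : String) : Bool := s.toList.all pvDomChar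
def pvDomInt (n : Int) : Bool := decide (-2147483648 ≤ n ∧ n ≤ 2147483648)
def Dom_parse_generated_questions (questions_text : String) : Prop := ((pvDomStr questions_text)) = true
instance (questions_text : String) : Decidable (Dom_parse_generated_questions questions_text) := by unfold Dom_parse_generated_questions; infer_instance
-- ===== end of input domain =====

-- B replaces A's single stateful scan (string accumulator) by a segmentation of the
-- stripped lines at header boundaries; same result, alternative decomposition.


-- ===== PORT A =====
-- shared helper: Python's `line and (line[0].isdigit() or line.startswith('Q'))`
-- (both Source A's inline test and Source B's _is_header)
def pvIsHeader (l : List Char) : Bool :=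
  match l with
  | [] => false
  | c :: _ => PySem.Chars.isdigit c || PySem.Chars.startswith l ['Q']

def parse_generated_questions (questions_text : String) : List String :=
  let lines := PySem.Chars.splitOn questions_text.toList ['\n']
  let st := lines.foldl
    (fun (st : List (List Char) × List Char) line =>
      let line := PySem.Chars.strip line
      if pvIsHeader line then
        ((if st.2 ≠ [] then st.1 ++ [PySem.Chars.strip st.2] else st.1), line)
      else
        (st.1, st.2 ++ '\n' :: line))
    ([], [])
  (if st.2 ≠ [] then st.1 ++ [PySem.Chars.strip st.2] else st.1).map String.ofList

-- ===== PORT B =====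
def pvSplitLead : List (List Char) → List (List Char) × List (List Char)
  | [] => ([], [])
  | l :: ls =>
    if pvIsHeader l then ([], l :: ls)
    else
      let r := pvSplitLead ls
      (l :: r.1, r.2)

theorem pvSplitLead_snd_length_le : ∀ ls : List (List Char), (pvSplitLead ls).2.length ≤ ls.length := by
  intro ls
  induction ls with
  | nil => simp [pvSplitLead]
  | cons l ls ih =>
    simp only [pvSplitLead]
    split
    · simp
    · simpa using Nat.le_succ_of_le ih

def pvGroups : List (List Char) → List (List Char)
  | [] => []
  | h :: rest =>
    let p := pvSplitLead rest
    PySem.Chars.strip (PySem.Chars.join ['\n'] (h :: p.1)) :: pvGroups p.2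
termination_by ls => ls.length
decreasing_by
  exact Nat.lt_succ_of_le (pvSplitLead_snd_length_le rest)

def parse_generated_questions_alt (questions_text : String) : List String :=
  let lines := (PySem.Chars.splitOn questions_text.toList ['\n']).map PySem.Chars.strip
  let p := pvSplitLead lines
  let head := if p.1 ≠ [] then [PySem.Chars.strip (PySem.Chars.join ['\n'] p.1)] else []
  (head ++ pvGroups p.2).map String.ofList

-- ===== PRECONDITION & SPEC =====
def Spec_parse_generated_questions (questions_text : String) (out : List String) : Prop := out = parse_generated_questions_alt questions_text
instance (questions_text : String) (out : List String) : Decidable (Spec_parse_generated_questions questions_text out) := by unfold Spec_parse_generated_questions; infer_instance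

-- ===== CLAIM (what is proved, stated in full; the proofs are below) =====
def Claim_equal_parse_generated_questions : Prop := ∀ (questions_text : String), Dom_parse_generated_questions questions_text → Spec_parse_generated_questions questions_text (parse_generated_questions questions_text)

-- ===== LEMMAS AND PROOFS =====

-- A's loop body on an already-stripped line
def pvStepA' (st : List (List Char) × List Char) (line : List Char) : List (List Char) × List Char :=
  if pvIsHeader line then
    ((if st.2 ≠ [] then st.1 ++ [PySem.Chars.strip st.2] else st.1), line)
  else
    (st.1, st.2 ++ '\n' :: line)

def pvFinish (st : List (List Char) × List Char) : List (List Char) :=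
  if st.2 ≠ [] then st.1 ++ [PySem.Chars.strip st.2] else st.1

-- A's tail computation, with the pending accumulator made explicit
def pvContA (cur : List Char) : List (List Char) → List (List Char)
  | [] => if cur ≠ [] then [PySem.Chars.strip cur] else []
  | l :: ls =>
    if pvIsHeader l then
      (if cur ≠ [] then [PySem.Chars.strip cur] else []) ++ pvContA l ls
    else
      pvContA (cur ++ '\n' :: l) ls

-- the accumulator built by consuming lines `lead` starting from `cur`
def pvJoinAcc (cur : List Char) (lead : List (List Char)) : List Char :=
  lead.foldl (fun c l => c ++ '\n' :: l) cur

theorem pvRunEq : ∀ (ls : List (List Char)) (qs : List (List Char)) (cur : List Char),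
    pvFinish (ls.foldl pvStepA' (qs, cur)) = qs ++ pvContA cur ls := by
  intro ls
  induction ls with
  | nil =>
    intro qs cur
    by_cases h : cur = [] <;> simp [pvFinish, pvContA, h]
  | cons l ls ih =>
    intro qs cur
    simp only [List.foldl_cons, pvContA, pvStepA']
    by_cases hh : pvIsHeader l
    · simp only [hh, if_pos, ih]
      by_cases hc : cur = [] <;> simp [hc]
    · simp [hh, ih]

theorem pvJoinAcc_append : ∀ (lead : List (List Char)) (x y : List Char),
    pvJoinAcc (x ++ y) lead = x ++ pvJoinAcc y lead := by
  intro lead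
  induction lead with
  | nil => intro x y; simp [pvJoinAcc]
  | cons b rest ih =>
    intro x y
    simp only [pvJoinAcc, List.foldl_cons] at *
    rw [List.append_assoc, ih]

theorem pvJoin_cons_eq_joinAcc : ∀ (body : List (List Char)) (l : List Char),
    PySem.Chars.join ['\n'] (l :: body) = pvJoinAcc l body := by
  intro body
  induction body with
  | nil => intro l; simp [PySem.Chars.join, List.intercalate, pvJoinAcc]
  | cons b rest ih =>
    intro l
    have h1 : PySem.Chars.join ['\n'] (l :: b :: rest)
        = l ++ '\n' :: PySem.Chars.join ['\n'] (b :: rest) := by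
      simp [PySem.Chars.join, List.intercalate]
    rw [h1, ih]
    show l ++ '\n' :: pvJoinAcc b rest = pvJoinAcc (l ++ '\n' :: b) rest
    have := pvJoinAcc_append rest l ('\n' :: b)
    rw [this]
    have h2 : pvJoinAcc ('\n' :: b) rest = '\n' :: pvJoinAcc b rest := by
      have := pvJoinAcc_append rest ['\n'] b
      simpa using this
    rw [h2]

theorem pvStrip_newline_cons (s : List Char) :
    PySem.Chars.strip ('\n' :: s) = PySem.Chars.strip s := by
  simp [PySem.Chars.strip, PySem.Chars.lstrip, List.dropWhile, PySem.Chars.isspace]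

theorem pvLeadLemma : ∀ (ls : List (List Char)) (cur : List Char),
    pvContA cur ls =
      (if pvJoinAcc cur (pvSplitLead ls).1 ≠ [] then
        [PySem.Chars.strip (pvJoinAcc cur (pvSplitLead ls).1)] else [])
      ++ pvGroups (pvSplitLead ls).2 := by
  intro ls
  induction ls with
  | nil => intro cur; simp [pvSplitLead, pvJoinAcc, pvContA, pvGroups]
  | cons l ls ih =>
    intro cur
    by_cases hh : pvIsHeader l
    · -- header: the pending block is flushed, l starts a group
      have hl : l ≠ [] := by
        intro h; rw [h] at hh; simp [pvIsHeader] at hh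
      simp only [pvContA, pvSplitLead, hh, if_pos, pvJoinAcc, List.foldl_nil]
      have hgroup : pvContA l ls = pvGroups (l :: ls) := by
        rw [ih l]
        simp only [pvGroups]
        have hne : pvJoinAcc l (pvSplitLead ls).1 ≠ [] := by
          have := pvJoinAcc_append (pvSplitLead ls).1 l []
          simp only [List.append_nil] at this
          rw [this]
          simp [hl]
        rw [if_pos hne, pvJoin_cons_eq_joinAcc]
        simp
      rw [hgroup]
    · simp only [pvContA, pvSplitLead, hh]
      rw [ih (cur ++ '\n' :: l)]
      rfl

theorem pvJoinAcc_nil_cons (l : List Char) (body : List (List Char)) :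
    pvJoinAcc [] (l :: body) = '\n' :: pvJoinAcc l body := by
  show pvJoinAcc ([] ++ '\n' :: l) body = _
  have := pvJoinAcc_append body ['\n'] l
  simpa using this

-- ===== VERDICT (by name: the statement is the Claim_ definition above) =====
theorem parse_generated_questions_spec : Claim_equal_parse_generated_questions := by
  intro t _
  unfold Spec_parse_generated_questions parse_generated_questions parse_generated_questions_alt
  simp only []
  set ls := (PySem.Chars.splitOn t.toList ['\n']).map PySem.Chars.strip with hls
  congr 1
  have hfold : (PySem.Chars.splitOn t.toList ['\n']).foldl
      (fun (st : List (List Char) × List Char) line =>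
        let line := PySem.Chars.strip line
        if pvIsHeader line then
          ((if st.2 ≠ [] then st.1 ++ [PySem.Chars.strip st.2] else st.1), line)
        else
          (st.1, st.2 ++ '\n' :: line)) ([], [])
      = ls.foldl pvStepA' ([], []) := by
    rw [hls, List.foldl_map]
    rfl
  show pvFinish _ = _
  rw [hfold, pvRunEq ls [] [], List.nil_append, pvLeadLemma ls []]
  cases hsp : (pvSplitLead ls).1 with
  | nil => simp [pvJoinAcc]
  | cons l body =>
    have h1 : pvJoinAcc [] (l :: body) = '\n' :: pvJoinAcc l body :=
      pvJoinAcc_nil_cons l body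
    rw [h1, pvStrip_newline_cons, ← pvJoin_cons_eq_joinAcc]
    simp
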